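-- pv_equiv track=rewrite | github.com/anders-ahsman/advent-of-code | 2015/day25/main.py | solve
-- ===== SOURCE A (Python) =====
-- def solve(row_target, col_target):
--     diagonals_cnt = 1
--     value = 20151125
--     while True:
--         for row in reversed(range(1, diagonals_cnt)):
--             col = diagonals_cnt - row
--             if row == row_target and col == col_target:
--                 return value
--             value = (value * 252533) % 33554393
--         diagonals_cnt += 1
-- ===== SOURCE B (Python) =====
-- def solve(row_target, col_target):
--     diag = row_target + col_target
--     idx = (diag - 1) * (diag - 2) // 2 + col_target
--     return 20151125 * pow(252533, idx - 1, 33554393) % 33554393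
-- ===== Notes on version B (the rewrite author's own statement) =====
-- stated objective: faster
-- what changed: Replaces the cell-by-cell diagonal walk (one modular multiplication per grid cell) with the closed-form cell ordinal (diag-1)(diag-2)//2 + col and a single modular exponentiation pow(252533, idx-1, 33554393).
import Mathlib
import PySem

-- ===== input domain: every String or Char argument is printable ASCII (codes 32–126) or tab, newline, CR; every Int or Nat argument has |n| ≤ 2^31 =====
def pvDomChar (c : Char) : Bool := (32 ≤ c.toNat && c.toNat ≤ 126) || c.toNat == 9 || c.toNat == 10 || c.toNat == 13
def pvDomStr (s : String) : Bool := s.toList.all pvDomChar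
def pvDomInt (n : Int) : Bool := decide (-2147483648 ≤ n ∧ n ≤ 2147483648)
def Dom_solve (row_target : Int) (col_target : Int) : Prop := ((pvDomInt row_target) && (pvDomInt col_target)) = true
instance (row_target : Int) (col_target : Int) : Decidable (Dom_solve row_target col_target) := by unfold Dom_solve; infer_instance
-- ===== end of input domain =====

-- B replaces A's cell-by-cell diagonal walk with the closed-form cell ordinal and one
-- modular exponentiation (objective: faster, asymptotically).

-- ===== PORT A =====
-- inner 'for row in reversed(range(1, diagonals_cnt))' loop; first component 'some v' = early return
def solveInner (rows : List Int) (diagonals_cnt row_target col_target value : Int) :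
    Option Int × Int :=
  match rows with
  | [] => (none, value)
  | row :: rest =>
    let col := diagonals_cnt - row
    if row = row_target ∧ col = col_target then (some value, value)
    else solveInner rest diagonals_cnt row_target col_target
      (PySem.Int.mod (value * 252533) 33554393)

-- the 'while True' loop; fuel makes it total — inside Pre_solve the return happens before fuel runs out
def solveOuter (fuel : Nat) (diagonals_cnt row_target col_target value : Int) : Int :=
  match fuel with
  | 0 => 0
  | Nat.succ f =>
    match solveInner ((PySem.List.pyRange 1 diagonals_cnt 1).reverse)
        diagonals_cnt row_target col_target value with
    | (some v, _) => v
    | (none, value') => solveOuter f (diagonals_cnt + 1) row_target col_target value'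

def solve (row_target : Int) (col_target : Int) : Int :=
  solveOuter (row_target + col_target).toNat 1 row_target col_target 20151125

-- ===== PORT B =====
def solve_alt (row_target : Int) (col_target : Int) : Int :=
  let diag := row_target + col_target
  let idx := PySem.Int.floordiv ((diag - 1) * (diag - 2)) 2 + col_target
  PySem.Int.mod (20151125 * PySem.Int.powMod 252533 (idx - 1).toNat 33554393) 33554393

-- ===== PRECONDITION & SPEC =====
-- Pre_ excludes exactly the inputs with row_target < 1 or col_target < 1: no grid cell has such
-- coordinates, so A's while-True loop never returns (it diverges) there.
def Pre_solve (row_target : Int) (col_target : Int) : Prop :=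
  1 ≤ row_target ∧ 1 ≤ col_target
instance (row_target : Int) (col_target : Int) : Decidable (Pre_solve row_target col_target) := by
  unfold Pre_solve; infer_instance
def pvWitness_solve : Int × Int := (2, 3)
def Spec_solve (row_target : Int) (col_target : Int) (out : Int) : Prop :=
  out = solve_alt row_target col_target
instance (row_target : Int) (col_target : Int) (out : Int) : Decidable (Spec_solve row_target col_target out) := by unfold Spec_solve; infer_instance

-- ===== CLAIM (what is proved, stated in full; the proofs are below) =====
def Claim_equal_solve : Prop := ∀ (row_target : Int) (col_target : Int), Dom_solve row_target col_target → Pre_solve row_target col_target → Spec_solve row_target col_target (solve row_target col_target)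

-- ===== LEMMAS AND PROOFS =====

-- k modular multiplications starting from v (what A's inner loop does to 'value')
def stepN (v : Int) : Nat → Int
  | 0 => v
  | Nat.succ k => stepN (PySem.Int.mod (v * 252533) 33554393) k

-- number of multiplications A performs from diagonal d with n diagonals left before the hit
def expFrom (ct : Int) : Nat → Int → Nat
  | 0, _ => (ct - 1).toNat
  | Nat.succ n, d => (d - 1).toNat + expFrom ct n (d + 1)

lemma pymod_eq (a : Int) : PySem.Int.mod a 33554393 = a % 33554393 :=
  PySem.Int.mod_eq_emod_of_pos (by norm_num)

lemma stepN_add (v : Int) (a b : Nat) : stepN v (a + b) = stepN (stepN v a) b := by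
  induction a generalizing v with
  | zero => simp [stepN]
  | succ a ih => rw [Nat.succ_add]; simp only [stepN]; exact ih _

lemma stepN_eq (v : Int) (k : Nat) (hv : v % 33554393 = v) :
    stepN v k = v * 252533 ^ k % 33554393 := by
  induction k generalizing v with
  | zero => simp [stepN, hv]
  | succ k ih =>
    simp only [stepN, pymod_eq]
    rw [ih _ (Int.emod_emod_of_dvd _ dvd_rfl)]
    rw [Int.mul_emod, Int.emod_emod_of_dvd _ dvd_rfl, ← Int.mul_emod]
    ring_nf

lemma solveOuter_succ (f : Nat) (d rt ct v : Int) :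
    solveOuter (f + 1) d rt ct v =
      match solveInner ((PySem.List.pyRange 1 d 1).reverse) d rt ct v with
      | (some r, _) => r
      | (none, v') => solveOuter f (d + 1) rt ct v' := rfl

lemma inner_nohit (rows : List Int) (d rt ct v : Int)
    (h : ∀ row ∈ rows, ¬(row = rt ∧ d - row = ct)) :
    solveInner rows d rt ct v = (none, stepN v rows.length) := by
  induction rows generalizing v with
  | nil => simp [solveInner, stepN]
  | cons row rest ih =>
    simp only [solveInner]
    rw [if_neg (h row (List.mem_cons_self))]
    rw [ih _ (fun r hr => h r (List.mem_cons_of_mem _ hr))]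
    simp [stepN]

lemma inner_hit (pre rest : List Int) (d rt ct v : Int)
    (hpre : ∀ row ∈ pre, row ≠ rt) (hct : d - rt = ct) :
    solveInner (pre ++ rt :: rest) d rt ct v =
      (some (stepN v pre.length), stepN v pre.length) := by
  induction pre generalizing v with
  | nil => simp [solveInner, stepN, hct]
  | cons row pre' ih =>
    simp only [List.cons_append, solveInner]
    rw [if_neg (by intro h; exact hpre row List.mem_cons_self h.1)]
    rw [ih _ (fun r hr => hpre r (List.mem_cons_of_mem _ hr))]
    simp [stepN]

lemma outer_eq (rt ct : Int) (hrt : 1 ≤ rt) (hct : 1 ≤ ct) :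
    ∀ (n : Nat) (d v : Int), 1 ≤ d → d + n = rt + ct →
      solveOuter (n + 1) d rt ct v = stepN v (expFrom ct n d) := by
  intro n
  induction n with
  | zero =>
    intro d v hd hsum
    simp only [Nat.cast_zero, add_zero] at hsum
    -- d = rt + ct : the hit diagonal
    have hsplit : PySem.List.pyRange 1 d 1 =
        PySem.List.pyRange 1 rt 1 ++ PySem.List.pyRange rt d 1 :=
      PySem.List.pyRange_one_append 1 rt d hrt (by omega)
    have hcons : PySem.List.pyRange rt d 1 = rt :: PySem.List.pyRange (rt + 1) d 1 :=
      PySem.List.pyRange_one_cons (by omega)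
    rw [solveOuter_succ, hsplit, hcons]
    have : (PySem.List.pyRange 1 rt 1 ++ rt :: PySem.List.pyRange (rt + 1) d 1).reverse =
        (PySem.List.pyRange (rt + 1) d 1).reverse ++ rt :: (PySem.List.pyRange 1 rt 1).reverse := by
      simp
    rw [this]
    rw [inner_hit _ _ _ _ _ _
      (by
        intro row hrow
        rw [List.mem_reverse, PySem.List.mem_pyRange_one] at hrow
        omega)
      (by omega)]
    have hlen : (PySem.List.pyRange (rt + 1) d 1).reverse.length = (ct - 1).toNat := by
      simp [PySem.List.length_pyRange_one]; omega
    rw [hlen]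
    simp [expFrom]
  | succ n ih =>
    intro d v hd hsum
    have hne : d ≠ rt + ct := by push_cast at hsum; omega
    rw [solveOuter_succ]
    rw [inner_nohit _ _ _ _ _
      (by
        intro row hrow hcontra
        rw [List.mem_reverse, PySem.List.mem_pyRange_one] at hrow
        exact hne (by omega))]
    have hlen : (PySem.List.pyRange 1 d 1).reverse.length = (d - 1).toNat := by
      simp [PySem.List.length_pyRange_one]
    rw [hlen]
    show solveOuter (n + 1) (d + 1) rt ct (stepN v (d - 1).toNat) = stepN v (expFrom ct (n + 1) d)
    rw [ih (d + 1) _ (by omega) (by push_cast at hsum ⊢; omega)]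
    simp only [expFrom]
    rw [stepN_add]

lemma twice_expFrom (ct : Int) (hct : 1 ≤ ct) :
    ∀ (n : Nat) (d : Int), 1 ≤ d →
      2 * (expFrom ct n d : Int) = (d + n - 1) * (d + n - 2) - (d - 1) * (d - 2) + 2 * (ct - 1) := by
  intro n
  induction n with
  | zero =>
    intro d hd
    simp only [expFrom]
    have h1 : (((ct - 1).toNat : Int)) = ct - 1 := by omega
    push_cast
    rw [h1]; ring
  | succ n ih =>
    intro d hd
    have h := ih (d + 1) (by omega)
    simp only [expFrom]
    push_cast
    push_cast at h
    have hdn : ((d - 1).toNat : Int) = d - 1 := by omega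
    nlinarith [h, hdn]

-- ===== VERDICT (by name: the statement is the Claim_ definition above) =====
theorem solve_spec : Claim_equal_solve := by
  intro rt ct _ hpre
  obtain ⟨hrt, hct⟩ := hpre
  unfold Spec_solve
  set D := rt + ct with hD
  have hfuel : D.toNat = (D - 1).toNat + 1 := by omega
  have hE := outer_eq rt ct hrt hct (D - 1).toNat 1 20151125 le_rfl (by omega)
  unfold solve
  rw [← hD, hfuel, hE]
  set E := expFrom ct (D - 1).toNat 1 with hEdef
  have h2E : 2 * (E : Int) = (D - 1) * (D - 2) + 2 * (ct - 1) := by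
    rw [hEdef]
    have h' := twice_expFrom ct hct (D - 1).toNat 1 le_rfl
    push_cast at h'
    have hcast : ((D - 1).toNat : Int) = D - 1 := by omega
    rw [hcast] at h'
    linarith [h']
  rw [stepN_eq _ _ (by decide)]
  simp only [solve_alt, PySem.Int.powMod_eq, pymod_eq, ← hD]
  have hidx : ((PySem.Int.floordiv ((D - 1) * (D - 2)) 2 + ct - 1).toNat) = E := by
    have hfm := PySem.Int.floordiv_mul_add_mod ((D - 1) * (D - 2)) 2
    have hm0 : 0 ≤ PySem.Int.mod ((D - 1) * (D - 2)) 2 := PySem.Int.mod_nonneg _ (by norm_num)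
    have hm2 : PySem.Int.mod ((D - 1) * (D - 2)) 2 < 2 := PySem.Int.mod_lt _ (by norm_num)
    generalize hP : (D - 1) * (D - 2) = P at *
    omega
  rw [hidx]
  conv_rhs => rw [Int.mul_emod, Int.emod_emod_of_dvd _ dvd_rfl, ← Int.mul_emod]
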